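-- pv_equiv track=rewrite | github.com/edudati/ciatec-research-api | scripts/check_openapi_parity.py | canonical_path_key
-- ===== SOURCE A (Python) =====
-- def canonical_path_key(path: str) -> str:
--     raw = path.rstrip("/") or "/"
--     parts = raw.split("/")
--     out: list[str] = []
--     i = 0
--     for part in parts:
--         if part.startswith("{") and part.endswith("}"):
--             out.append(f"{{p{i}}}")
--             i += 1
--         else:
--             out.append(part)
--     return "/".join(out)
-- ===== SOURCE B (Python) =====
-- def canonical_path_key(path: str) -> str:
--     raw = path.rstrip("/") or "/"
--     res = ""
--     seg = ""
--     n = 0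
--     for ch in raw + "/":
--         if ch == "/":
--             if len(seg) >= 2 and seg[0] == "{" and seg[-1] == "}":
--                 res += "{p%d}" % n
--                 n += 1
--             else:
--                 res += seg
--             res += "/"
--             seg = ""
--         else:
--             seg += ch
--     return res[:-1]
-- ===== Notes on version B (the rewrite author's own statement) =====
-- stated objective: alternative
-- what changed: A splits the raw path on '/', rewrites brace segments in a list of parts and re-joins; B makes a single character scan over the raw path with a segment buffer and counter, emitting each segment (canonicalised or literal) as it meets each '/', with no split/join.
import Mathlib
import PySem

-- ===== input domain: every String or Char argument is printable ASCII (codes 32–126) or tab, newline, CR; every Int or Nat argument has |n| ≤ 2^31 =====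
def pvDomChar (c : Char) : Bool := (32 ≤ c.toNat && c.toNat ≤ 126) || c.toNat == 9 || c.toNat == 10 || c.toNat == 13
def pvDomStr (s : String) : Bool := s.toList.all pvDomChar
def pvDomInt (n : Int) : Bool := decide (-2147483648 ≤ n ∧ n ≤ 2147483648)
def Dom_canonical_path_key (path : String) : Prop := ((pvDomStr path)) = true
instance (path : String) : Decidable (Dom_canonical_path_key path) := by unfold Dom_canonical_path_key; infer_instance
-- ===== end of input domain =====

-- B replaces A's split-into-parts / rebuild-list / join pipeline by a single character scan over
-- the raw path that emits each segment when it meets a '/': alternative decomposition, same cost.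

-- shared helpers: both Pythons contain the identical line `raw = path.rstrip("/") or "/"`
-- and the identical placeholder format "{p<i>}"
-- hand port of str.rstrip("/") (PySem has no rstrip-with-chars form); exact: drops exactly the trailing '/' chars
def pvRstripSlash (cs : List Char) : List Char := (cs.reverse.dropWhile (fun c => c == '/')).reverse
def pvRaw (path : String) : List Char :=
  let r := pvRstripSlash path.toList
  if r = [] then ['/'] else r
-- f"{{p{i}}}" resp. "{p%d}" % n
def pvPKey (n : Int) : List Char := '{' :: 'p' :: ((PySem.Int.toStr n).toList ++ ['}'])

-- ===== PORT A =====
-- the loop body: out/i as the fold state; branch order as in A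
def pvStepA (st : List (List Char) × Int) (part : List Char) : List (List Char) × Int :=
  if PySem.Chars.startswith part ['{'] && PySem.Chars.endswith part ['}'] then
    (st.1 ++ [pvPKey st.2], st.2 + 1)
  else
    (st.1 ++ [part], st.2)

def canonical_path_key (path : String) : String :=
  String.mk (PySem.Chars.join ['/'] (((PySem.Chars.splitOn (pvRaw path) ['/'])).foldl pvStepA ([], 0)).1)

-- ===== PORT B =====
-- the loop body of Source B: state (res, seg, n)
def pvStepB (st : List Char × List Char × Int) (ch : Char) : List Char × List Char × Int :=
  if ch == '/' then
    let e : List Char × Int :=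
      if 2 ≤ st.2.1.length ∧ PySem.List.pyGet? st.2.1 0 = some '{' ∧ PySem.List.pyGet? st.2.1 (-1) = some '}' then
        (st.1 ++ pvPKey st.2.2, st.2.2 + 1)
      else
        (st.1 ++ st.2.1, st.2.2)
    (e.1 ++ ['/'], [], e.2)
  else
    (st.1, st.2.1 ++ [ch], st.2.2)

def canonical_path_key_alt (path : String) : String :=
  String.mk (PySem.List.slice ((((pvRaw path) ++ ['/'])).foldl pvStepB ([], [], 0)).1 none (some (-1)))

-- ===== PRECONDITION & SPEC =====
def Spec_canonical_path_key (path : String) (out : String) : Prop := out = canonical_path_key_alt path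
instance (path : String) (out : String) : Decidable (Spec_canonical_path_key path out) := by unfold Spec_canonical_path_key; infer_instance

-- ===== CLAIM (what is proved, stated in full; the proofs are below) =====
def Claim_equal_canonical_path_key : Prop := ∀ (path : String), Dom_canonical_path_key path → Spec_canonical_path_key path (canonical_path_key path)

-- ===== LEMMAS AND PROOFS =====

-- structural characterisation of PySem.Chars.splitOn with separator ['/']
def pvSplit : List Char → List Char → List (List Char)
  | cur, [] => [cur]
  | cur, c :: rest => if c = '/' then cur :: pvSplit [] rest else pvSplit (cur ++ [c]) rest

theorem pvSplit_ne_nil (cur s : List Char) : pvSplit cur s ≠ [] := by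
  induction s generalizing cur with
  | nil => simp [pvSplit]
  | cons c rest ih => by_cases h : c = '/' <;> simp [pvSplit, h, ih]

theorem pvSplitOn_go (fuel : Nat) : ∀ (l cur : List Char) (acc : List (List Char)),
    l.length < fuel →
    PySem.Chars.splitOn.go ['/'] fuel l cur acc = acc.reverse ++ pvSplit cur.reverse l := by
  induction fuel with
  | zero => intro l cur acc h; omega
  | succ fuel ih =>
      intro l cur acc h
      cases l with
      | nil => simp [PySem.Chars.splitOn.go, pvSplit]
      | cons c rest =>
          by_cases hc : c = '/'
          · subst hc
            simp only [PySem.Chars.splitOn.go, List.isPrefixOf, BEq.rfl, Bool.true_and, if_pos]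
            rw [ih]
            · simp [pvSplit]
            · simpa using Nat.lt_of_succ_lt_succ h
          · have hc' : ¬('/' = c) := fun hx => hc hx.symm
            have : (['/'].isPrefixOf (c :: rest)) = false := by
              simp [List.isPrefixOf]; exact hc'
            simp only [PySem.Chars.splitOn.go, this, Bool.false_eq_true, if_neg, not_false_iff]
            rw [ih]
            · simp [pvSplit, hc]
            · simpa using Nat.lt_of_succ_lt_succ h

theorem pvSplitOn_eq (s : List Char) : PySem.Chars.splitOn s ['/'] = pvSplit [] s := by
  unfold PySem.Chars.splitOn
  rw [pvSplitOn_go (s.length + 1) s [] []]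
  · simp
  · omega

-- A's loop as a structural recursion
def pvProcA : List (List Char) → Int → List (List Char)
  | [], _ => []
  | p :: ps, i =>
      if PySem.Chars.startswith p ['{'] && PySem.Chars.endswith p ['}'] then
        pvPKey i :: pvProcA ps (i + 1)
      else
        p :: pvProcA ps i

theorem pvProcA_ne_nil (ps : List (List Char)) (n : Int) (h : ps ≠ []) : pvProcA ps n ≠ [] := by
  cases ps with
  | nil => exact absurd rfl h
  | cons p t => unfold pvProcA; split <;> simp

theorem pvJoin_cons (x : List Char) (l : List (List Char)) (h : l ≠ []) :
    PySem.Chars.join ['/'] (x :: l) = x ++ '/' :: PySem.Chars.join ['/'] l := by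
  cases l with
  | nil => exact absurd rfl h
  | cons y t => rw [PySem.Chars.join_cons_cons]; simp

theorem pvSingleton_prefix_iff (a : Char) (l : List Char) : [a] <+: l ↔ l.head? = some a := by
  cases l <;> simp [List.cons_prefix_cons, eq_comm]

theorem pvPyGet_zero (l : List Char) : PySem.List.pyGet? l 0 = l.head? := by
  cases l <;> simp [PySem.List.pyGet?, PySem.List.pyIdx?]

-- A's per-part condition equals B's explicit length/head/last test
theorem pvCond_eq (seg : List Char) :
    (PySem.Chars.startswith seg ['{'] && PySem.Chars.endswith seg ['}']) =
    decide (2 ≤ seg.length ∧ PySem.List.pyGet? seg 0 = some '{' ∧ PySem.List.pyGet? seg (-1) = some '}') := by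
  rw [Bool.eq_iff_iff]
  simp only [Bool.and_eq_true, decide_eq_true_eq, PySem.Chars.startswith_iff,
    PySem.Chars.endswith_iff, pvSingleton_prefix_iff, pvPyGet_zero, PySem.List.pyGet?_neg_one,
    show ∀ l : List Char, ([('}':Char)] <:+ l ↔ l.getLast? = some '}') from fun l => by
      rw [← List.reverse_prefix, ← List.head?_reverse]; exact pvSingleton_prefix_iff _ l.reverse]
  match seg with
  | [] => simp
  | [c] =>
      simp only [List.head?_cons, List.getLast?_singleton, List.length_singleton, Option.some_inj]
      constructor
      · rintro ⟨rfl, h⟩; exact absurd h (by decide)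
      · rintro ⟨h, _⟩; omega
  | c :: d :: t => simp

theorem pvFoldA_eq (parts : List (List Char)) : ∀ (out : List (List Char)) (i : Int),
    (parts.foldl pvStepA (out, i)).1 = out ++ pvProcA parts i := by
  induction parts with
  | nil => intro out i; simp [pvProcA]
  | cons p ps ih =>
      intro out i
      by_cases h : (PySem.Chars.startswith p ['{'] && PySem.Chars.endswith p ['}']) = true
      · simp [pvStepA, h, pvProcA, ih]
      · simp [pvStepA, h, pvProcA, ih]

-- the main correspondence: B's scan over the '/'-terminated string computes A's join over the split
theorem pvScan_eq (s : List Char) : ∀ (res cur : List Char) (n : Int),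
    ((s ++ ['/']).foldl pvStepB (res, cur, n)).1 =
      res ++ PySem.Chars.join ['/'] (pvProcA (pvSplit cur s) n) ++ ['/'] := by
  induction s with
  | nil =>
      intro res cur n
      by_cases h : 2 ≤ cur.length ∧ PySem.List.pyGet? cur 0 = some '{' ∧ PySem.List.pyGet? cur (-1) = some '}'
      · simp [pvStepB, pvSplit, pvProcA, pvCond_eq, h, PySem.Chars.join_singleton]
      · simp [pvStepB, pvSplit, pvProcA, pvCond_eq, h, PySem.Chars.join_singleton]
  | cons c rest ih =>
      intro res cur n
      by_cases hc : c = '/'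
      · subst hc
        rw [List.cons_append, List.foldl_cons]
        have hsplit : pvSplit cur ('/' :: rest) = cur :: pvSplit [] rest := by simp [pvSplit]
        rw [hsplit]
        by_cases h : 2 ≤ cur.length ∧ PySem.List.pyGet? cur 0 = some '{' ∧ PySem.List.pyGet? cur (-1) = some '}'
        · have hstep : pvStepB (res, cur, n) '/' = (res ++ pvPKey n ++ ['/'], [], n + 1) := by
            simp [pvStepB, h]
          rw [hstep, ih]
          have hp : pvProcA (cur :: pvSplit [] rest) n = pvPKey n :: pvProcA (pvSplit [] rest) (n + 1) := by
            simp only [pvProcA]; rw [pvCond_eq]; simp [h]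
          rw [hp, pvJoin_cons _ _ (pvProcA_ne_nil _ _ (pvSplit_ne_nil _ _))]
          simp
        · have hstep : pvStepB (res, cur, n) '/' = (res ++ cur ++ ['/'], [], n) := by
            simp [pvStepB, h]
          rw [hstep, ih]
          have hp : pvProcA (cur :: pvSplit [] rest) n = cur :: pvProcA (pvSplit [] rest) n := by
            simp only [pvProcA]; rw [pvCond_eq]; simp [h]
          rw [hp, pvJoin_cons _ _ (pvProcA_ne_nil _ _ (pvSplit_ne_nil _ _))]
          simp
      · rw [List.cons_append, List.foldl_cons]
        have hstep : pvStepB (res, cur, n) c = (res, cur ++ [c], n) := by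
          simp [pvStepB, hc]
        rw [hstep, ih]
        simp [pvSplit, hc]

-- ===== VERDICT (by name: the statement is the Claim_ definition above) =====
theorem canonical_path_key_spec : Claim_equal_canonical_path_key := by
  intro path _
  unfold Spec_canonical_path_key canonical_path_key canonical_path_key_alt
  rw [pvSplitOn_eq, pvFoldA_eq, pvScan_eq]
  simp [pysem]
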